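-- pv_equiv track=rewrite | github.com/rickhousemedia/dbt-CentralDataWarehouse | scripts/analyze_and_email_results.py | create_fallback_summary
-- ===== SOURCE A (Python) =====
-- def create_fallback_summary(run_results):
--     """Create a basic summary if OpenAI API fails"""
--     total_models = len(run_results.get('results', []))
--     successful = len([r for r in run_results.get('results', []) if r.get('status') == 'success'])
--     failed = len([r for r in run_results.get('results', []) if r.get('status') == 'error'])
--
--     failed_models = [r.get('unique_id') for r in run_results.get('results', []) if r.get('status') == 'error']
--
--     html_content = f"""
--     <h2>dbt Run Summary (Fallback)</h2>
--     <p><strong>Total Models:</strong> {total_models}</p>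
--     <p><strong>Successful:</strong> {successful}</p>
--     <p><strong>Failed:</strong> {failed}</p>
--
--     {f"<p><strong>Failed Models:</strong></p><ul>{''.join([f'<li>{model}</li>' for model in failed_models])}</ul>" if failed_models else ""}
--
--     <p><em>Note: This is a basic summary due to OpenAI API unavailability.</em></p>
--     """
--
--     return html_content
-- ===== SOURCE B (Python) =====
-- def create_fallback_summary(run_results):
--     """Create a basic summary if OpenAI API fails (single-pass version)"""
--     total = 0
--     successful = 0
--     failed = 0
--     failed_models = []
--     for r in run_results.get('results', []):
--         total += 1
--         status = r.get('status')
--         if status == 'success':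
--             successful += 1
--         elif status == 'error':
--             failed += 1
--             failed_models.append(r.get('unique_id'))
--
--     if failed_models:
--         items = ''.join(f'<li>{model}</li>' for model in failed_models)
--         failed_block = f"<p><strong>Failed Models:</strong></p><ul>{items}</ul>"
--     else:
--         failed_block = ""
--
--     return f"""
--     <h2>dbt Run Summary (Fallback)</h2>
--     <p><strong>Total Models:</strong> {total}</p>
--     <p><strong>Successful:</strong> {successful}</p>
--     <p><strong>Failed:</strong> {failed}</p>
--
--     {failed_block}
--
--     <p><em>Note: This is a basic summary due to OpenAI API unavailability.</em></p>
--     """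
-- ===== Notes on version B (the rewrite author's own statement) =====
-- stated objective: alternative
-- what changed: Replaced four separate scans of the results list (len plus three list comprehensions) by one accumulator loop that counts total/successful/failed and collects failed model ids in a single pass, then builds the same HTML.
import Mathlib
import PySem

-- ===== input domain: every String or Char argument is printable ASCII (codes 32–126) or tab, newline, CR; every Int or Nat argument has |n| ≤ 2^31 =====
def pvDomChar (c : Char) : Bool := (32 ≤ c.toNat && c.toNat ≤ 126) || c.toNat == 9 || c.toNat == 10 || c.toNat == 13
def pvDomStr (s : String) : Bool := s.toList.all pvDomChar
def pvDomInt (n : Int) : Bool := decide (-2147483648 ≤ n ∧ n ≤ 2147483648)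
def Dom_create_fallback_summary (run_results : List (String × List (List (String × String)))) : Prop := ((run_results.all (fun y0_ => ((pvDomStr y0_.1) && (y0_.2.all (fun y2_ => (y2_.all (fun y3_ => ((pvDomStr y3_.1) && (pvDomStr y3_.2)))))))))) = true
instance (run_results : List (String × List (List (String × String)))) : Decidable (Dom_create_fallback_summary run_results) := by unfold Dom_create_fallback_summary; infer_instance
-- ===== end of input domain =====

-- B replaces A's four scans of the results list by one accumulator loop; same HTML output (alternative decomposition, no speed claim).

-- shared rendering helper: Python f'{x}' where x is a str-or-None (r.get('unique_id')); str(None) = "None" — exact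
def pvShowOptStr (o : Option String) : String :=
  match o with
  | some s => s
  | none => "None"

-- ===== PORT A =====
def create_fallback_summary (run_results : List (String × List (List (String × String)))) : String :=
  let results := (PySem.Dict.mk run_results).getD "results" []
  let total_models : Int := results.length
  let successful : Int := (results.filter (fun r => (PySem.Dict.mk r).get? "status" == some "success")).length
  let failed : Int := (results.filter (fun r => (PySem.Dict.mk r).get? "status" == some "error")).length
  let failed_models : List (Option String) :=
    (results.filter (fun r => (PySem.Dict.mk r).get? "status" == some "error")).map
      (fun r => (PySem.Dict.mk r).get? "unique_id")
  "\n    <h2>dbt Run Summary (Fallback)</h2>\n    <p><strong>Total Models:</strong> " ++ PySem.Int.toStr total_models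
    ++ "</p>\n    <p><strong>Successful:</strong> " ++ PySem.Int.toStr successful
    ++ "</p>\n    <p><strong>Failed:</strong> " ++ PySem.Int.toStr failed
    ++ "</p>\n    \n    "
    ++ (if failed_models.isEmpty then ""
        else "<p><strong>Failed Models:</strong></p><ul>"
          ++ PySem.Str.join "" (failed_models.map (fun model => "<li>" ++ pvShowOptStr model ++ "</li>"))
          ++ "</ul>")
    ++ "\n    \n    <p><em>Note: This is a basic summary due to OpenAI API unavailability.</em></p>\n    "

-- ===== PORT B =====
-- B's loop body (one iteration of the for-loop in Source B)
def pvStep (st : Int × Int × Int × List (Option String)) (r : List (String × String)) :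
    Int × Int × Int × List (Option String) :=
  let st := (st.1 + 1, st.2.1, st.2.2.1, st.2.2.2)
  let status := (PySem.Dict.mk r).get? "status"
  if status == some "success" then (st.1, st.2.1 + 1, st.2.2.1, st.2.2.2)
  else if status == some "error" then
    (st.1, st.2.1, st.2.2.1 + 1, st.2.2.2 ++ [(PySem.Dict.mk r).get? "unique_id"])
  else st

def create_fallback_summary_alt (run_results : List (String × List (List (String × String)))) : String :=
  let st := ((PySem.Dict.mk run_results).getD "results" []).foldl pvStep (0, 0, 0, [])
  let failed_block :=
    if !st.2.2.2.isEmpty then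
      "<p><strong>Failed Models:</strong></p><ul>"
        ++ PySem.Str.join "" (st.2.2.2.map (fun model => "<li>" ++ pvShowOptStr model ++ "</li>"))
        ++ "</ul>"
    else ""
  "\n    <h2>dbt Run Summary (Fallback)</h2>\n    <p><strong>Total Models:</strong> " ++ PySem.Int.toStr st.1
    ++ "</p>\n    <p><strong>Successful:</strong> " ++ PySem.Int.toStr st.2.1
    ++ "</p>\n    <p><strong>Failed:</strong> " ++ PySem.Int.toStr st.2.2.1
    ++ "</p>\n    \n    "
    ++ failed_block
    ++ "\n    \n    <p><em>Note: This is a basic summary due to OpenAI API unavailability.</em></p>\n    "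

-- ===== PRECONDITION & SPEC =====
def Spec_create_fallback_summary (run_results : List (String × List (List (String × String)))) (out : String) : Prop := out = create_fallback_summary_alt run_results
instance (run_results : List (String × List (List (String × String)))) (out : String) : Decidable (Spec_create_fallback_summary run_results out) := by unfold Spec_create_fallback_summary; infer_instance

-- ===== CLAIM (what is proved, stated in full; the proofs are below) =====
def Claim_equal_create_fallback_summary : Prop := ∀ (run_results : List (String × List (List (String × String)))), Dom_create_fallback_summary run_results → Spec_create_fallback_summary run_results (create_fallback_summary run_results)

-- ===== LEMMAS AND PROOFS =====

-- B's fold state equals A's four separately-computed quantities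
theorem pv_fold_state (results : List (List (String × String)))
    (t s f : Int) (acc : List (Option String)) :
    results.foldl pvStep (t, s, f, acc)
    = (t + results.length,
       s + ((results.filter (fun r => (PySem.Dict.mk r).get? "status" == some "success")).length : Int),
       f + ((results.filter (fun r => (PySem.Dict.mk r).get? "status" == some "error")).length : Int),
       acc ++ (results.filter (fun r => (PySem.Dict.mk r).get? "status" == some "error")).map
         (fun r => (PySem.Dict.mk r).get? "unique_id")) := by
  induction results generalizing t s f acc with
  | nil => simp
  | cons r rest ih =>
    rw [List.foldl_cons]
    by_cases hs : ((PySem.Dict.mk r).get? "status" == some "success") = true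
    · rw [show pvStep (t, s, f, acc) r = (t + 1, s + 1, f, acc) from by simp [pvStep, hs], ih]
      have he : ((PySem.Dict.mk r).get? "status" == some "error") = false := by
        simp_all
      simp [hs, he]
      constructor
      · omega
      · omega
    · by_cases he : ((PySem.Dict.mk r).get? "status" == some "error") = true
      · rw [show pvStep (t, s, f, acc) r
              = (t + 1, s, f + 1, acc ++ [(PySem.Dict.mk r).get? "unique_id"]) from by
            simp [pvStep, hs, he], ih]
        simp [hs, he]
        constructor
        · omega
        · omega
      · rw [show pvStep (t, s, f, acc) r = (t + 1, s, f, acc) from by simp [pvStep, hs, he], ih]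
        simp [hs, he]
        omega

-- ===== VERDICT (by name: the statement is the Claim_ definition above) =====
theorem create_fallback_summary_spec : Claim_equal_create_fallback_summary := by
  intro run_results _
  unfold Spec_create_fallback_summary create_fallback_summary create_fallback_summary_alt
  simp only [pv_fold_state, List.nil_append, zero_add]
  cases h : ((((PySem.Dict.mk run_results).getD "results" []).filter
      (fun r => (PySem.Dict.mk r).get? "status" == some "error")).map
      (fun r => (PySem.Dict.mk r).get? "unique_id")).isEmpty <;>
    simp [h]
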